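-- pv_equiv track=rewrite | github.com/ZeroAuto/code-wars | python/longest_consec.py | longest_consec
-- ===== SOURCE A (Python) =====
-- def longest_consec(strarr, k):
--     result = ""
--     if k > 0 and len(strarr) >= k:
--         for i in range(len(strarr) - k + 1):
--             temp_result = "".join(strarr[i:k+i])
--             if len(temp_result) > len(result):
--                 result = temp_result
--     return result
-- ===== SOURCE B (Python) =====
-- def longest_consec(strarr, k):
--     n = len(strarr)
--     if k <= 0 or n < k:
--         return ""
--     prefix = [0]
--     for s in strarr:
--         prefix.append(prefix[-1] + len(s))
--     best_i = None
--     best_sum = 0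
--     for i in range(n - k + 1):
--         w = prefix[i + k] - prefix[i]
--         if w > best_sum:
--             best_sum = w
--             best_i = i
--     if best_i is None:
--         return ""
--     return "".join(strarr[best_i:best_i + k])
-- ===== Notes on version B (the rewrite author's own statement) =====
-- stated objective: faster
-- what changed: B computes a prefix-sum array of string lengths, scans window sums to locate the first maximum-length window, and performs a single join at the end, instead of A's joining every window and comparing joined strings.
import Mathlib
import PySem

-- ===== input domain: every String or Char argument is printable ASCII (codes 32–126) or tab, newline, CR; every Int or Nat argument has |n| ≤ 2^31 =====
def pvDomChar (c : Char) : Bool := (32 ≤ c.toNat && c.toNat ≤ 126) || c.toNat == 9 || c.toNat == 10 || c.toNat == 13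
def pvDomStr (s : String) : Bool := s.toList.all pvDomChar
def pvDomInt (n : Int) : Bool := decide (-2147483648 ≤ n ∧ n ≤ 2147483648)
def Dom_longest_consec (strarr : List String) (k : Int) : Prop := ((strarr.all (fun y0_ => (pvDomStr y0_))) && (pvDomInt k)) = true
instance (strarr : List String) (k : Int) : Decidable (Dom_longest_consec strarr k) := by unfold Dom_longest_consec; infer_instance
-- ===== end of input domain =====

-- B replaces A's per-window join with prefix sums of the lengths and a single final join; return-value equivalence is proved below.

-- ===== PORT A =====
-- literal transliteration of Source A: for each window, join it and compare lengths
def longest_consec (strarr : List String) (k : Int) : String :=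
  let result : String := ""
  if k > 0 ∧ (strarr.length : Int) ≥ k then
    (PySem.List.pyRange 0 ((strarr.length : Int) - k + 1) 1).foldl
      (fun result i =>
        let temp_result := PySem.Str.join "" (PySem.List.slice strarr (some i) (some (k + i)))
        if PySem.Str.len temp_result > PySem.Str.len result then temp_result else result)
      result
  else result

-- ===== PORT B =====
-- literal transliteration of Source B: prefix sums of lengths, first strictly-best window, one join
-- ('if best_i is None … else …' is rendered with Option.elim)
def longest_consec_alt (strarr : List String) (k : Int) : String :=
  let n : Int := strarr.length
  if k ≤ 0 ∨ n < k then ""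
  else
    let pre := strarr.foldl
      (fun pre s => pre ++ [PySem.List.pyGetD pre (-1) 0 + PySem.Str.len s]) [(0 : Int)]
    let st := (PySem.List.pyRange 0 (n - k + 1) 1).foldl
      (fun st i =>
        let w := PySem.List.pyGetD pre (i + k) 0 - PySem.List.pyGetD pre i 0
        if w > st.2 then (some i, w) else st)
      ((none : Option Int), (0 : Int))
    st.1.elim "" (fun j => PySem.Str.join "" (PySem.List.slice strarr (some j) (some (j + k))))

-- ===== PRECONDITION & SPEC =====
def Spec_longest_consec (strarr : List String) (k : Int) (out : String) : Prop := out = longest_consec_alt strarr k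
instance (strarr : List String) (k : Int) (out : String) : Decidable (Spec_longest_consec strarr k out) := by unfold Spec_longest_consec; infer_instance

-- ===== CLAIM (what is proved, stated in full; the proofs are below) =====
def Claim_equal_longest_consec : Prop := ∀ (strarr : List String) (k : Int), Dom_longest_consec strarr k → Spec_longest_consec strarr k (longest_consec strarr k)

-- ===== LEMMAS AND PROOFS =====

-- length of "".join(parts), on the List Char side
theorem pv_chars_len_join : ∀ (ps : List (List Char)),
    (PySem.Chars.join [] ps).length = (ps.map List.length).sum := by
  intro ps
  induction ps with
  | nil => simp [PySem.Chars.join_nil]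
  | cons a r ih =>
    cases r with
    | nil => simp [PySem.Chars.join_singleton]
    | cons b t =>
      rw [PySem.Chars.join_cons_cons]
      simp only [List.length_append, List.length_nil, List.map_cons, List.sum_cons] at *
      omega

theorem pv_len_join (parts : List String) :
    PySem.Str.len (PySem.Str.join "" parts) = (parts.map PySem.Str.len).sum := by
  have h := pv_chars_len_join (parts.map String.toList)
  rw [List.map_map] at h
  have h2 : parts.map PySem.Str.len = parts.map (fun s => ((s.toList.length : Nat) : Int)) :=
    List.map_congr_left (fun s _ => by simp [PySem.Str.len_eq])
  have hsep : "".toList = ([] : List Char) := rfl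
  rw [PySem.Str.len_eq, PySem.Str.toList_join, hsep, h, h2, Nat.cast_list_sum, List.map_map]
  rfl

-- the prefix-building loop is a scanl of the lengths
theorem pv_fold_prefix : ∀ (l : List String) (acc : List Int) (h : acc ≠ []),
    l.foldl (fun pre s => pre ++ [PySem.List.pyGetD pre (-1) 0 + PySem.Str.len s]) acc
      = acc.dropLast ++ List.scanl (fun a s => a + PySem.Str.len s) (acc.getLast h) l := by
  intro l
  induction l with
  | nil =>
    intro acc h
    simp [List.dropLast_append_getLast h]
  | cons s t ih =>
    intro acc h
    rw [List.foldl_cons, PySem.List.pyGetD_neg_one (h := h),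
        ih (acc ++ [acc.getLast h + PySem.Str.len s]) (by simp)]
    rw [List.scanl_cons, List.dropLast_concat, List.getLast_concat]
    rw [List.append_cons, List.dropLast_append_getLast h]

theorem pv_prefix_eq (l : List String) :
    l.foldl (fun pre s => pre ++ [PySem.List.pyGetD pre (-1) 0 + PySem.Str.len s]) [(0 : Int)]
      = List.scanl (fun a s => a + PySem.Str.len s) 0 l := by
  simpa using pv_fold_prefix l [(0 : Int)] (by simp)

-- indexing a scanl of running sums
theorem pv_scanl_getD : ∀ (l : List String) (x : Int) (j : Nat), j ≤ l.length →
    (List.scanl (fun a s => a + PySem.Str.len s) x l).getD j 0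
      = x + ((l.take j).map PySem.Str.len).sum := by
  intro l
  induction l with
  | nil =>
    intro x j hj
    simp only [List.length_nil, Nat.le_zero] at hj
    subst hj
    simp
  | cons s t ih =>
    intro x j hj
    cases j with
    | zero => simp
    | succ j' =>
      rw [List.scanl_cons]
      simp only [List.getD_cons_succ, List.take_succ_cons, List.map_cons, List.sum_cons]
      rw [ih (x + PySem.Str.len s) j' (by simpa using hj)]
      ring

-- the window sum read off the prefix list equals the length of the joined window
theorem pv_window (strarr : List String) (k i : Int) (hk : 0 < k) (hi : 0 ≤ i)
    (hik : i + k ≤ (strarr.length : Int)) :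
    PySem.List.pyGetD
        (strarr.foldl (fun pre s => pre ++ [PySem.List.pyGetD pre (-1) 0 + PySem.Str.len s]) [(0 : Int)])
        (i + k) 0
      - PySem.List.pyGetD
        (strarr.foldl (fun pre s => pre ++ [PySem.List.pyGetD pre (-1) 0 + PySem.Str.len s]) [(0 : Int)])
        i 0
      = PySem.Str.len (PySem.Str.join "" (PySem.List.slice strarr (some i) (some (k + i)))) := by
  rw [pv_prefix_eq]
  have hlenP : (List.scanl (fun a s => a + PySem.Str.len s) 0 strarr).length
      = strarr.length + 1 := by rw [List.length_scanl]
  have h1 : PySem.List.pyGetD (List.scanl (fun a s => a + PySem.Str.len s) 0 strarr) (i + k) 0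
      = (List.scanl (fun a s => a + PySem.Str.len s) 0 strarr).getD (i + k).toNat 0 := by
    rw [PySem.List.pyGetD_eq_getElem _ 0 (by omega) (by rw [hlenP]; push_cast; omega),
        List.getD_eq_getElem _ _ (by rw [hlenP]; omega)]
  have h2 : PySem.List.pyGetD (List.scanl (fun a s => a + PySem.Str.len s) 0 strarr) i 0
      = (List.scanl (fun a s => a + PySem.Str.len s) 0 strarr).getD i.toNat 0 := by
    rw [PySem.List.pyGetD_eq_getElem _ 0 hi (by rw [hlenP]; push_cast; omega),
        List.getD_eq_getElem _ _ (by rw [hlenP]; omega)]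
  rw [h1, h2, pv_scanl_getD strarr 0 (i + k).toNat (by omega),
      pv_scanl_getD strarr 0 i.toNat (by omega)]
  have hsplit : (i + k).toNat = i.toNat + k.toNat := by omega
  rw [hsplit, List.take_add, List.map_append, List.sum_append]
  have hslice : PySem.List.slice strarr (some i) (some (k + i))
      = ((strarr.drop i.toNat).take ((k + i).toNat - i.toNat)) := PySem.List.slice_toNat _ hi (by omega)
  have hkk : (k + i).toNat - i.toNat = k.toNat := by omega
  rw [hslice, hkk, pv_len_join]
  ring

-- the best-window state B maintains, read back as the string A maintains
def pvRepr (strarr : List String) (k : Int) (bi : Option Int) : String :=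
  bi.elim "" (fun j => PySem.Str.join "" (PySem.List.slice strarr (some j) (some (j + k))))

-- the two folds run in lock-step
theorem pv_loop (strarr : List String) (k : Int) (pf : List Int) :
    ∀ (L : List Int),
      (∀ i ∈ L, PySem.List.pyGetD pf (i + k) 0 - PySem.List.pyGetD pf i 0
          = PySem.Str.len (PySem.Str.join "" (PySem.List.slice strarr (some i) (some (k + i))))) →
      ∀ (res : String) (bi : Option Int) (bs : Int),
        res = pvRepr strarr k bi → PySem.Str.len res = bs →
        (L.foldl (fun result i =>
            let temp_result := PySem.Str.join "" (PySem.List.slice strarr (some i) (some (k + i)))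
            if PySem.Str.len temp_result > PySem.Str.len result then temp_result else result) res
          = pvRepr strarr k
              (L.foldl (fun st i =>
                  let w := PySem.List.pyGetD pf (i + k) 0 - PySem.List.pyGetD pf i 0
                  if w > st.2 then (some i, w) else st) (bi, bs)).1)
        ∧ PySem.Str.len (L.foldl (fun result i =>
            let temp_result := PySem.Str.join "" (PySem.List.slice strarr (some i) (some (k + i)))
            if PySem.Str.len temp_result > PySem.Str.len result then temp_result else result) res)
          = (L.foldl (fun st i =>
                  let w := PySem.List.pyGetD pf (i + k) 0 - PySem.List.pyGetD pf i 0
                  if w > st.2 then (some i, w) else st) (bi, bs)).2 := by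
  intro L
  induction L with
  | nil =>
    intro _ res bi bs h1 h2
    exact ⟨h1, h2⟩
  | cons i t ih =>
    intro hw res bi bs h1 h2
    have hwi := hw i (by simp)
    have hwt : ∀ j ∈ t, PySem.List.pyGetD pf (j + k) 0 - PySem.List.pyGetD pf j 0
        = PySem.Str.len (PySem.Str.join "" (PySem.List.slice strarr (some j) (some (k + j)))) := by
      intro j hj; exact hw j (by simp [hj])
    simp only [List.foldl_cons]
    by_cases hc : PySem.Str.len (PySem.Str.join "" (PySem.List.slice strarr (some i) (some (k + i))))
        > PySem.Str.len res
    · have hcB : PySem.List.pyGetD pf (i + k) 0 - PySem.List.pyGetD pf i 0 > bs := by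
        rw [hwi, ← h2]; exact hc
      rw [if_pos hc, if_pos hcB]
      exact ih hwt _ (some i) _
        (by simp only [pvRepr, Option.elim_some]; rw [Int.add_comm k i]) hwi.symm
    · have hcB : ¬ (PySem.List.pyGetD pf (i + k) 0 - PySem.List.pyGetD pf i 0 > bs) := by
        rw [hwi, ← h2]; exact hc
      rw [if_neg hc, if_neg hcB]
      exact ih hwt res bi bs h1 h2

-- ===== VERDICT (by name: the statement is the Claim_ definition above) =====
theorem longest_consec_spec : Claim_equal_longest_consec := by
  intro strarr k _
  unfold Spec_longest_consec longest_consec longest_consec_alt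
  by_cases hg : k > 0 ∧ (strarr.length : Int) ≥ k
  · rw [if_pos hg, if_neg (by omega)]
    have hw : ∀ i ∈ PySem.List.pyRange 0 ((strarr.length : Int) - k + 1) 1,
        PySem.List.pyGetD
            (strarr.foldl (fun pre s => pre ++ [PySem.List.pyGetD pre (-1) 0 + PySem.Str.len s]) [(0 : Int)])
            (i + k) 0
          - PySem.List.pyGetD
            (strarr.foldl (fun pre s => pre ++ [PySem.List.pyGetD pre (-1) 0 + PySem.Str.len s]) [(0 : Int)])
            i 0
          = PySem.Str.len (PySem.Str.join "" (PySem.List.slice strarr (some i) (some (k + i)))) := by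
      intro i hi
      rw [PySem.List.mem_pyRange_one] at hi
      exact pv_window strarr k i hg.1 hi.1 (by omega)
    have h := (pv_loop strarr k _ _ hw "" none 0 rfl (by decide)).1
    rw [h]
    rfl
  · rw [if_neg hg, if_pos (by omega)]
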